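-- pv_equiv track=rewrite | github.com/DeveloperDankyMan/Ro-Nav | main.py | find_surface_indices_for_pair
-- ===== SOURCE A (Python) =====
-- from typing import Dict, Any, List, Tuple, Optional
--
-- def find_surface_indices_for_pair(from_id: int, to_id: int, mapped_surfaces: List[List[int]]) -> Tuple[int,int,int,int]:
--     i1 = i2 = j1 = j2 = 0
--     s1 = s2 = None
--     for s in mapped_surfaces:
--         if from_id in s and s1 is None:
--             s1 = s
--         if to_id in s and s2 is None:
--             s2 = s
--         if s1 is not None and s2 is not None:
--             break
--     if s1 is not None:
--         try:
--             i1 = s1.index(from_id) + 1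
--         except ValueError:
--             i1 = 0
--         i2 = s1.index(to_id) + 1 if to_id in s1 else 0
--     if s2 is not None and s2 is not s1:
--         j1 = s2.index(from_id) + 1 if from_id in s2 else 0
--         try:
--             j2 = s2.index(to_id) + 1
--         except ValueError:
--             j2 = 0
--     return i1, i2, j1, j2
-- ===== SOURCE B (Python) =====
-- def find_surface_indices_for_pair(from_id, to_id, mapped_surfaces):
--     # Build an index once: first surface containing each id, and the 1-based
--     # first position of each id within each surface; answers are dict lookups.
--     first = {}   # id -> index of first surface containing it
--     where = {}   # (surface index, id) -> 1-based first position in that surface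
--     for si, s in enumerate(mapped_surfaces):
--         for pi, v in enumerate(s):
--             first.setdefault(v, si)
--             where.setdefault((si, v), pi + 1)
--     a = first.get(from_id)
--     b = first.get(to_id)
--     i1 = 0 if a is None else where.get((a, from_id), 0)
--     i2 = 0 if a is None else where.get((a, to_id), 0)
--     if b is None or b == a:
--         return i1, i2, 0, 0
--     return i1, i2, where.get((b, from_id), 0), where.get((b, to_id), 0)
-- ===== Notes on version B (the rewrite author's own statement) =====
-- stated objective: alternative
-- what changed: Replaced A's coupled scan-with-break plus four ad-hoc guarded .index lookups by a single preprocessing pass that builds two dictionaries (id -> first surface index, (surface,id) -> first 1-based position) so all four answers become plain dict lookups with no per-target scan.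
import Mathlib
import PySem

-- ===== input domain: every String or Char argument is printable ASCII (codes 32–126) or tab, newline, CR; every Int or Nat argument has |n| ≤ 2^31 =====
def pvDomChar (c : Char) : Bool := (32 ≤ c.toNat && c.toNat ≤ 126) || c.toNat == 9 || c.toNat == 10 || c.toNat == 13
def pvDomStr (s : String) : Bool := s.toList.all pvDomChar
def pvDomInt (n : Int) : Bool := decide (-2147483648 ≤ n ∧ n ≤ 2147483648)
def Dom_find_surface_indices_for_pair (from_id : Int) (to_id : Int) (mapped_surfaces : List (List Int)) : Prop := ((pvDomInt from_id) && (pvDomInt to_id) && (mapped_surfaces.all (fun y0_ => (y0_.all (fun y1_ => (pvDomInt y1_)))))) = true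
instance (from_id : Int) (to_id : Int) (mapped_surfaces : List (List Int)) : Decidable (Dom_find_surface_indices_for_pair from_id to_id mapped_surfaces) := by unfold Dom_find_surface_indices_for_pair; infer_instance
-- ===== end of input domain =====

-- B replaces A's coupled scan-with-break and four guarded .index lookups by one preprocessing
-- pass building two dictionaries (id -> first surface index, (surface,id) -> first 1-based
-- position), after which all four answers are plain dict lookups (objective: alternative).

-- ===== PORT A =====
-- A's for-loop with break: state (s1, s2), stop early once both are found.
def pvLoopA (from_id : Int) (to_id : Int) : List (List Int) → Option (List Int) → Option (List Int) → Option (List Int) × Option (List Int)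
  | [], s1, s2 => (s1, s2)
  | s :: rest, s1, s2 =>
    let s1' := if from_id ∈ s ∧ s1 = none then some s else s1
    let s2' := if to_id ∈ s ∧ s2 = none then some s else s2
    if s1' ≠ none ∧ s2' ≠ none then (s1', s2') else pvLoopA from_id to_id rest s1' s2'

-- Python's `s2 is not s1` (object identity) is ported as value inequality: s1 and s2 are the
-- first surfaces of the same traversal containing from_id resp. to_id, so they are the same
-- object exactly when they are equal as values (established by the uniqueness lemma below).
def find_surface_indices_for_pair (from_id : Int) (to_id : Int) (mapped_surfaces : List (List Int)) : Int × Int × Int × Int :=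
  let p := pvLoopA from_id to_id mapped_surfaces none none
  let s1 := p.1
  let s2 := p.2
  let i1 : Int := match s1 with
    | none => 0
    | some l => match PySem.List.index? l from_id with
      | some k => (k : Int) + 1
      | none => 0          -- A's try/except ValueError
  let i2 : Int := match s1 with
    | none => 0
    | some l => if to_id ∈ l then (match PySem.List.index? l to_id with
        | some k => (k : Int) + 1
        | none => 0) else 0
  let jp : Int × Int := match s2 with
    | none => (0, 0)
    | some l2 =>
      if some l2 = s1 then (0, 0)
      else
        (if from_id ∈ l2 then (match PySem.List.index? l2 from_id with
            | some k => (k : Int) + 1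
            | none => 0) else 0,
         match PySem.List.index? l2 to_id with
          | some k => (k : Int) + 1
          | none => 0)     -- A's try/except ValueError
  (i1, i2, jp.1, jp.2)

-- ===== PORT B =====
-- Source B's inner loop body: first.setdefault(v, si); where.setdefault((si, v), pi + 1)
def pvIndexStep (si : Int) (acc : PySem.Dict Int Int × PySem.Dict (Int × Int) Int) (q : Int × Int) :
    PySem.Dict Int Int × PySem.Dict (Int × Int) Int :=
  (acc.1.setdefault q.2 si, acc.2.setdefault (si, q.2) (q.1 + 1))

def find_surface_indices_for_pair_alt (from_id : Int) (to_id : Int) (mapped_surfaces : List (List Int)) : Int × Int × Int × Int :=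
  let idx := (PySem.List.enumerate mapped_surfaces).foldl
      (fun acc p => (PySem.List.enumerate p.2).foldl (pvIndexStep p.1) acc)
      (PySem.Dict.empty, PySem.Dict.empty)
  let a := idx.1.get? from_id
  let b := idx.1.get? to_id
  let i1 : Int := match a with | none => 0 | some k => idx.2.getD (k, from_id) 0
  let i2 : Int := match a with | none => 0 | some k => idx.2.getD (k, to_id) 0
  match b with
  | none => (i1, i2, 0, 0)
  | some kb =>
    if a = some kb then (i1, i2, 0, 0)
    else (i1, i2, idx.2.getD (kb, from_id) 0, idx.2.getD (kb, to_id) 0)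

-- ===== PRECONDITION & SPEC =====
def Spec_find_surface_indices_for_pair (from_id : Int) (to_id : Int) (mapped_surfaces : List (List Int)) (out : Int × Int × Int × Int) : Prop := out = find_surface_indices_for_pair_alt from_id to_id mapped_surfaces
instance (from_id : Int) (to_id : Int) (mapped_surfaces : List (List Int)) (out : Int × Int × Int × Int) : Decidable (Spec_find_surface_indices_for_pair from_id to_id mapped_surfaces out) := by unfold Spec_find_surface_indices_for_pair; infer_instance

-- ===== CLAIM (what is proved, stated in full; the proofs are below) =====
def Claim_equal_find_surface_indices_for_pair : Prop := ∀ (from_id : Int) (to_id : Int) (mapped_surfaces : List (List Int)), Dom_find_surface_indices_for_pair from_id to_id mapped_surfaces → Spec_find_surface_indices_for_pair from_id to_id mapped_surfaces (find_surface_indices_for_pair from_id to_id mapped_surfaces)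

-- ===== LEMMAS AND PROOFS =====

-- A's loop computes, for each id, the first surface containing it.
theorem pvLoopA_eq (f t : Int) : ∀ (l : List (List Int)) (s1 s2 : Option (List Int)),
    pvLoopA f t l s1 s2 =
      (s1.or (l.find? (fun s => decide (f ∈ s))), s2.or (l.find? (fun s => decide (t ∈ s)))) := by
  intro l
  induction l with
  | nil => intro s1 s2; simp [pvLoopA]
  | cons s rest ih =>
    intro s1 s2
    simp only [pvLoopA, List.find?]
    cases s1 with
    | some a =>
      cases s2 with
      | some b => simp
      | none =>
        by_cases ht : t ∈ s <;> simp [ht, ih, Option.or]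
    | none =>
      cases s2 with
      | some b =>
        by_cases hf : f ∈ s <;> simp [hf, ih, Option.or]
      | none =>
        by_cases hf : f ∈ s <;> by_cases ht : t ∈ s <;>
          simp [hf, ht, ih, Option.or]

-- first-index scan over a list (proof helper; relates B's dict to A's find?)
def pvFirstIdx (t : Int) : List (List Int) → Nat → Option Nat
  | [], _ => none
  | s :: rest, k => if t ∈ s then some k else pvFirstIdx t rest (k + 1)

theorem pvFirstIdx_shift (t : Int) : ∀ (l : List (List Int)) (k : Nat),
    pvFirstIdx t l (k + 1) = (pvFirstIdx t l k).map (· + 1) := by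
  intro l
  induction l with
  | nil => intro k; simp [pvFirstIdx]
  | cons s rest ih =>
    intro k
    by_cases h : t ∈ s <;> simp [pvFirstIdx, h, ih]

theorem pvFirstIdx_find (t : Int) : ∀ (l : List (List Int)),
    (pvFirstIdx t l 0).map (fun k => l.getD k []) = l.find? (fun s => decide (t ∈ s)) := by
  intro l
  induction l with
  | nil => simp [pvFirstIdx]
  | cons s rest ih =>
    by_cases h : t ∈ s
    · simp [pvFirstIdx, h, List.find?]
    · simp only [pvFirstIdx, if_neg h, List.find?]
      rw [pvFirstIdx_shift]
      simp only [Option.map_map]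
      rw [← ih]
      cases pvFirstIdx t rest 0 <;> simp [h]

theorem pvFirstIdx_mem {t : Int} {l : List (List Int)} {k : Nat}
    (h : pvFirstIdx t l 0 = some k) : t ∈ l[k]?.getD [] := by
  have h2 := pvFirstIdx_find t l
  rw [h] at h2
  have h3 := List.find?_some h2.symm
  simpa [List.getD] using h3

-- first-index scans for two targets can only land on equal surfaces at equal indices
theorem pvFirstIdx_unique {t1 t2 : Int} : ∀ {l : List (List Int)} {k1 k2 : Nat},
    pvFirstIdx t1 l 0 = some k1 → pvFirstIdx t2 l 0 = some k2 →
    l[k1]?.getD [] = l[k2]?.getD [] → k1 = k2 := by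
  intro l
  induction l with
  | nil => intro k1 k2 h1; simp [pvFirstIdx] at h1
  | cons s rest ih =>
    intro k1 k2 h1 h2 heq
    by_cases m1 : t1 ∈ s <;> by_cases m2 : t2 ∈ s
    · simp [pvFirstIdx, m1, m2] at h1 h2; omega
    · simp only [pvFirstIdx, if_pos m1, if_neg m2, Option.some.injEq] at h1 h2
      rw [pvFirstIdx_shift] at h2
      obtain ⟨m, hm, rfl⟩ := Option.map_eq_some_iff.mp h2
      subst h1
      have hmem := pvFirstIdx_mem hm
      simp at heq
      rw [← heq] at hmem
      exact absurd hmem m2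
    · simp only [pvFirstIdx, if_neg m1, if_pos m2, Option.some.injEq] at h1 h2
      rw [pvFirstIdx_shift] at h1
      obtain ⟨m, hm, rfl⟩ := Option.map_eq_some_iff.mp h1
      subst h2
      have hmem := pvFirstIdx_mem hm
      simp at heq
      rw [heq] at hmem
      exact absurd hmem m1
    · simp only [pvFirstIdx, if_neg m1, if_neg m2] at h1 h2
      rw [pvFirstIdx_shift] at h1 h2
      obtain ⟨m, hm, rfl⟩ := Option.map_eq_some_iff.mp h1
      obtain ⟨n, hn, rfl⟩ := Option.map_eq_some_iff.mp h2
      simp only [List.getElem?_cons_succ] at heq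
      have := ih hm hn heq
      omega

-- setdefault's effect on an arbitrary lookup
theorem pv_get?_setdefault {κ ν : Type} [BEq κ] [LawfulBEq κ] [DecidableEq κ]
    (d : PySem.Dict κ ν) (k x : κ) (v : ν) :
    (d.setdefault k v).get? x = (d.get? x).or (if x = k then some v else none) := by
  by_cases hc : d.contains k = true
  · rw [PySem.Dict.setdefault_of_contains d v hc]
    rw [PySem.Dict.contains_eq_isSome_get?] at hc
    by_cases hx : x = k
    · subst hx
      cases hg : d.get? x with
      | none => rw [hg] at hc; simp at hc
      | some w => simp
    · simp [hx]
  · rw [PySem.Dict.setdefault_of_not_contains d v (by simpa using hc)]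
    rw [PySem.Dict.contains_eq_isSome_get?] at hc
    rw [PySem.Dict.get?_insert]
    by_cases hx : x = k
    · subst hx
      cases hg : d.get? x with
      | none => simp
      | some w => rw [hg] at hc; simp at hc
    · simp [hx]

-- inner loop: effect on the `first` dict
theorem pvInner_fst (si : Int) (x : Int) : ∀ (s : List Int) (m : Int)
    (acc : PySem.Dict Int Int × PySem.Dict (Int × Int) Int),
    ((PySem.List.enumerate s m).foldl (pvIndexStep si) acc).1.get? x =
      (acc.1.get? x).or (if x ∈ s then some si else none) := by
  intro s
  induction s with
  | nil => intro m acc; simp [PySem.List.enumerate_nil]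
  | cons a s ih =>
    intro m acc
    rw [PySem.List.enumerate_cons, List.foldl_cons, ih]
    show ((acc.1.setdefault a si).get? x).or _ = _
    rw [pv_get?_setdefault]
    rw [Option.or_assoc]
    congr 1
    by_cases hx : x = a
    · subst hx; simp
    · simp [hx, List.mem_cons]

-- inner loop: effect on the `where` dict
theorem pvInner_snd (si : Int) (k x : Int) : ∀ (s : List Int) (m : Int)
    (acc : PySem.Dict Int Int × PySem.Dict (Int × Int) Int),
    ((PySem.List.enumerate s m).foldl (pvIndexStep si) acc).2.get? (k, x) =
      (acc.2.get? (k, x)).or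
        (if k = si then (PySem.List.index? s x).map (fun i => m + i + 1) else none) := by
  intro s
  induction s with
  | nil => intro m acc; simp [PySem.List.enumerate_nil, PySem.List.index?]
  | cons a s ih =>
    intro m acc
    rw [PySem.List.enumerate_cons, List.foldl_cons, ih]
    show ((acc.2.setdefault (si, a) (m + 1)).get? (k, x)).or _ = _
    rw [pv_get?_setdefault]
    rw [Option.or_assoc]
    congr 1
    by_cases hk : k = si
    · subst hk
      by_cases hx : x = a
      · subst hx
        rw [PySem.List.index?_cons_self]
        simp
      · rw [PySem.List.index?_cons_of_ne s (fun h => hx h.symm)]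
        simp only [Prod.mk.injEq, hx, and_false]
        cases PySem.List.index? s x with
        | none => simp
        | some i =>
          simp only [Option.bind_eq_bind]
          simp
          ring
    · have : (k, x) ≠ (si, a) := fun h => hk (congrArg Prod.fst h)
      simp [hk, this]

-- first-surface index, over the enumerate base (proof helper)
def pvFirstSpec (x : Int) : List (List Int) → Int → Option Int
  | [], _ => none
  | s :: rest, n => if x ∈ s then some n else pvFirstSpec x rest (n + 1)

-- first-position-in-surface-k, over the enumerate base (proof helper)
def pvWhereSpec (k x : Int) : List (List Int) → Int → Option Int
  | [], _ => none
  | s :: rest, n =>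
    if k = n then (PySem.List.index? s x).map (fun i => (i : Int) + 1)
    else pvWhereSpec k x rest (n + 1)

-- outer loop: `first` dict lookup
theorem pvOuter_fst (x : Int) : ∀ (ms : List (List Int)) (n : Int)
    (acc : PySem.Dict Int Int × PySem.Dict (Int × Int) Int),
    ((PySem.List.enumerate ms n).foldl
        (fun acc p => (PySem.List.enumerate p.2).foldl (pvIndexStep p.1) acc) acc).1.get? x =
      (acc.1.get? x).or (pvFirstSpec x ms n) := by
  intro ms
  induction ms with
  | nil => intro n acc; simp [PySem.List.enumerate_nil, pvFirstSpec]
  | cons s rest ih =>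
    intro n acc
    rw [PySem.List.enumerate_cons, List.foldl_cons, ih, pvInner_fst, Option.or_assoc]
    congr 1
    rw [pvFirstSpec]
    by_cases h : x ∈ s <;> simp [h]

theorem pvWhereSpec_lt {k : Int} {x : Int} : ∀ (ms : List (List Int)) {n : Int},
    k < n → pvWhereSpec k x ms n = none := by
  intro ms
  induction ms with
  | nil => intro n _; rfl
  | cons s rest ih =>
    intro n h
    rw [pvWhereSpec, if_neg (by omega)]
    exact ih (by omega)

-- outer loop: `where` dict lookup
theorem pvOuter_snd (k x : Int) : ∀ (ms : List (List Int)) (n : Int)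
    (acc : PySem.Dict Int Int × PySem.Dict (Int × Int) Int),
    ((PySem.List.enumerate ms n).foldl
        (fun acc p => (PySem.List.enumerate p.2).foldl (pvIndexStep p.1) acc) acc).2.get? (k, x) =
      (acc.2.get? (k, x)).or (pvWhereSpec k x ms n) := by
  intro ms
  induction ms with
  | nil => intro n acc; simp [PySem.List.enumerate_nil, pvWhereSpec]
  | cons s rest ih =>
    intro n acc
    rw [PySem.List.enumerate_cons, List.foldl_cons, ih, pvInner_snd, Option.or_assoc]
    congr 1
    rw [pvWhereSpec]
    by_cases hk : k = n
    · subst hk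
      rw [if_pos rfl, if_pos rfl, pvWhereSpec_lt rest (by omega)]
      cases PySem.List.index? s x with
      | none => simp
      | some i => simp
    · rw [if_neg hk, if_neg hk, Option.none_or]

-- pvFirstSpec is pvFirstIdx, cast to Int
theorem pvFirstSpec_eq (x : Int) : ∀ (ms : List (List Int)) (j : Nat),
    pvFirstSpec x ms (j : Int) = (pvFirstIdx x ms j).map (fun k => (k : Int)) := by
  intro ms
  induction ms with
  | nil => intro j; rfl
  | cons s rest ih =>
    intro j
    by_cases h : x ∈ s
    · simp [pvFirstSpec, pvFirstIdx, h]
    · rw [pvFirstSpec, if_neg h, pvFirstIdx, if_neg h]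
      have : ((j : Int) + 1) = ((j + 1 : Nat) : Int) := by push_cast; ring
      rw [this, ih]

-- pvWhereSpec at a valid Nat index reads the surface's first-occurrence index
theorem pvWhereSpec_at (x : Int) : ∀ (ms : List (List Int)) (n : Int) (k : Nat),
    pvWhereSpec (n + (k : Int)) x ms n =
      (match ms[k]? with
       | some s => (PySem.List.index? s x).map (fun i => (i : Int) + 1)
       | none => none) := by
  intro ms
  induction ms with
  | nil => intro n k; simp [pvWhereSpec]
  | cons s rest ih =>
    intro n k
    cases k with
    | zero => simp [pvWhereSpec]
    | succ k' =>
      rw [pvWhereSpec, if_neg (by push_cast; omega)]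
      have : n + ((k' + 1 : Nat) : Int) = (n + 1) + (k' : Int) := by push_cast; ring
      rw [this, ih]
      simp

-- position of x in surface k (Source B's where-lookup, as a function; proof helper)
def pvPos (mapped : List (List Int)) (k? : Option Nat) (t : Int) : Int :=
  match k? with
  | none => 0
  | some k =>
    let s := mapped.getD k []
    if t ∈ s then (match PySem.List.index? s t with
      | some i => (i : Int) + 1
      | none => 0) else 0

-- B's result, phrased through pvFirstIdx/pvPos (proof helper)
def pvAltSpec (from_id : Int) (to_id : Int) (mapped_surfaces : List (List Int)) : Int × Int × Int × Int :=
  let i := pvFirstIdx from_id mapped_surfaces 0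
  let j := pvFirstIdx to_id mapped_surfaces 0
  if j = none ∨ j = i then
    (pvPos mapped_surfaces i from_id, pvPos mapped_surfaces i to_id, 0, 0)
  else
    (pvPos mapped_surfaces i from_id, pvPos mapped_surfaces i to_id,
     pvPos mapped_surfaces j from_id, pvPos mapped_surfaces j to_id)

theorem pvFirstSpec_zero (x : Int) (ms : List (List Int)) :
    pvFirstSpec x ms 0 = (pvFirstIdx x ms 0).map (fun k => (k : Int)) := by
  have h := pvFirstSpec_eq x ms 0
  simpa using h

-- B's where-dict lookup at a Nat-cast key is pvPos
theorem pvB_getD (ms : List (List Int)) (k : Nat) (x : Int) :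
    ((PySem.List.enumerate ms 0).foldl
        (fun acc p => (PySem.List.enumerate p.2).foldl (pvIndexStep p.1) acc)
        (PySem.Dict.empty, PySem.Dict.empty)).2.getD ((k : Int), x) 0 = pvPos ms (some k) x := by
  rw [PySem.Dict.getD_eq_get?_getD, pvOuter_snd]
  simp only [PySem.Dict.get?_empty, Option.none_or]
  have h := pvWhereSpec_at x ms 0 k
  rw [zero_add] at h
  rw [h]
  unfold pvPos
  have hg : ms.getD k [] = (ms[k]?).getD [] := by
    simp [List.getD]
  cases hm : ms[k]? with
  | none => simp [hm]
  | some s =>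
    by_cases hx : x ∈ s
    · have : ∃ i, PySem.List.index? s x = some i := by
        have hi := (PySem.List.index?_isSome_iff s x).mpr hx
        cases hc : PySem.List.index? s x with
        | none => rw [hc] at hi; simp at hi
        | some i => exact ⟨i, rfl⟩
      obtain ⟨i, hi⟩ := this
      rw [PySem.List.index?_eq_idxOf?] at hi
      simp [hm, hx, hi]
    · have hn : PySem.List.index? s x = none := (PySem.List.index?_eq_none_iff s x).mpr hx
      rw [PySem.List.index?_eq_idxOf?] at hn
      simp [hm, hx, hn]

-- B's port equals its pvFirstIdx/pvPos phrasing
theorem pvAlt_eq_spec (f t : Int) (ms : List (List Int)) :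
    find_surface_indices_for_pair_alt f t ms = pvAltSpec f t ms := by
  simp only [find_surface_indices_for_pair_alt, pvAltSpec]
  rw [pvOuter_fst f ms 0, pvOuter_fst t ms 0]
  simp only [PySem.Dict.get?_empty, Option.none_or, pvFirstSpec_zero]
  cases hi : pvFirstIdx f ms 0 with
  | none =>
    cases hj : pvFirstIdx t ms 0 with
    | none => simp [pvPos]
    | some k2 =>
      have : ¬ ((none : Option Int) = some (k2 : Int)) := by simp
      simp [this, pvPos, pvB_getD]
  | some k1 =>
    cases hj : pvFirstIdx t ms 0 with
    | none => simp [pvB_getD, pvPos]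
    | some k2 =>
      by_cases hk : k1 = k2
      · subst hk
        simp [pvB_getD]
      · have h1 : ¬ ((some (k1 : Int)) = some (k2 : Int)) := by
          simp; intro h; exact hk (by exact_mod_cast h)
        have h2 : ¬ ((some k2 : Option Nat) = some k1) := by simp [Ne.symm hk]
        simp [h1, h2, pvB_getD]

-- ===== VERDICT (by name: the statement is the Claim_ definition above) =====
theorem find_surface_indices_for_pair_spec : Claim_equal_find_surface_indices_for_pair := by
  intro f t ms _hDom
  unfold Spec_find_surface_indices_for_pair
  rw [pvAlt_eq_spec]
  unfold find_surface_indices_for_pair pvAltSpec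
  rw [pvLoopA_eq]
  simp only [Option.or]
  rw [← pvFirstIdx_find f ms, ← pvFirstIdx_find t ms]
  cases hi : pvFirstIdx f ms 0 with
  | none =>
    cases hj : pvFirstIdx t ms 0 with
    | none => simp [pvPos]
    | some k2 =>
      have hm2 := pvFirstIdx_mem hj
      simp [pvPos, hm2]
  | some k1 =>
    have hm1 := pvFirstIdx_mem hi
    cases hj : pvFirstIdx t ms 0 with
    | none => simp [pvPos, hm1]
    | some k2 =>
      have hm2 := pvFirstIdx_mem hj
      by_cases hk : k1 = k2
      · subst hk
        simp [pvPos, hm1, hm2]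
      · have hne : ms[k2]?.getD [] ≠ ms[k1]?.getD [] := by
          intro h
          exact hk (pvFirstIdx_unique hi hj h.symm)
        simp [pvPos, hm1, hm2, hne, Ne.symm hk]
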